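-- pv_equiv track=rewrite | github.com/fxodell/pyidec-modbus | src/pyidec_modbus/client.py | _coalesce_ranges
-- ===== SOURCE A (Python) =====
-- def _coalesce_ranges(offset_to_tag: dict[int, str]) -> list[tuple[int, int, list[tuple[int, str]]]]:
--     """
--     Group (offset, tag) into contiguous ranges. Returns list of (start_offset, count, [(offset, tag), ...]).
--     """
--     if not offset_to_tag:
--         return []
--     sorted_offsets = sorted(offset_to_tag.keys())
--     ranges: list[tuple[int, int, list[tuple[int, str]]]] = []
--     start = sorted_offsets[0]
--     prev = start
--     group: list[tuple[int, str]] = [(start, offset_to_tag[start])]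
--     for off in sorted_offsets[1:]:
--         if off == prev + 1:
--             group.append((off, offset_to_tag[off]))
--             prev = off
--         else:
--             ranges.append((start, len(group), group))
--             start = off
--             prev = off
--             group = [(off, offset_to_tag[off])]
--     ranges.append((start, len(group), group))
--     return ranges
-- ===== SOURCE B (Python) =====
-- from itertools import groupby
--
-- def _coalesce_ranges(offset_to_tag: dict[int, str]) -> list[tuple[int, int, list[tuple[int, str]]]]:
--     """
--     Group (offset, tag) into contiguous ranges. Returns list of (start_offset, count, [(offset, tag), ...]).
--     """
--     offsets = sorted(offset_to_tag)
--     result = []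
--     for _, grp in groupby(enumerate(offsets), key=lambda p: p[1] - p[0]):
--         run = [off for _, off in grp]
--         result.append((run[0], len(run), [(off, offset_to_tag[off]) for off in run]))
--     return result
-- ===== Notes on version B (the rewrite author's own statement) =====
-- stated objective: idiomatic
-- what changed: Replaces the explicit start/prev/group state machine with the standard itertools.groupby consecutive-integers idiom keyed on offset minus index over the sorted, enumerated keys.
import Mathlib
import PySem

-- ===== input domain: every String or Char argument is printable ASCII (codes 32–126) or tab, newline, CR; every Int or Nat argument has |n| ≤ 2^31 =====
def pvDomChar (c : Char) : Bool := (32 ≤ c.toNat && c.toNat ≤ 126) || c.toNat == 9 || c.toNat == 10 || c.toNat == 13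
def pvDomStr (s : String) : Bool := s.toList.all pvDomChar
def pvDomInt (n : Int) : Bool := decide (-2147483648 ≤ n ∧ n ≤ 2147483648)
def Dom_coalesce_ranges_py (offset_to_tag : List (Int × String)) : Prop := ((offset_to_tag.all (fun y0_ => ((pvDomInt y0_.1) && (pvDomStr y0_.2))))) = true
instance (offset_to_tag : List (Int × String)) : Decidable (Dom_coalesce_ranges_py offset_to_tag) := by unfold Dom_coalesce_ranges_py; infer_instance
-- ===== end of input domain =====

-- B replaces A's start/prev/group state machine with the groupby-on-(offset - index) idiom; objective: idiomatic.

-- ===== PORT A =====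
def coalesce_ranges_py (offset_to_tag : List (Int × String)) : List (Int × Int × (List (Int × String))) :=
  let d := PySem.Dict.ofList offset_to_tag
  -- 'if not offset_to_tag: return []' and 'sorted_offsets[0]' are rendered together as one match on the sorted key list
  match PySem.List.sorted d.keys (fun x => x) false with
  | [] => []
  | start :: rest =>
    let s := rest.foldl
      (fun (st : List (Int × Int × List (Int × String)) × Int × Int × List (Int × String)) off =>
        if off = st.2.2.1 + 1 then
          (st.1, st.2.1, off, st.2.2.2 ++ [(off, d.getD off "")])
        else
          (st.1 ++ [(st.2.1, (st.2.2.2.length : Int), st.2.2.2)], off, off, [(off, d.getD off "")]))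
      ([], start, start, [(start, d.getD start "")])
    s.1 ++ [(s.2.1, (s.2.2.2.length : Int), s.2.2.2)]

-- ===== PORT B =====
-- itertools.groupby with an Int-valued key: split off the run of elements whose key equals the group key
def pvSpanKey {α : Type} (key : α → Int) (k : Int) : List α → List α × List α
  | [] => ([], [])
  | x :: xs =>
    if key x = k then
      let p := pvSpanKey key k xs
      (x :: p.1, p.2)
    else ([], x :: xs)

theorem pvSpanKey_snd_length_le {α : Type} (key : α → Int) (k : Int) :
    ∀ l : List α, (pvSpanKey key k l).2.length ≤ l.length := by
  intro l
  induction l with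
  | nil => simp [pvSpanKey]
  | cons x xs ih =>
    simp only [pvSpanKey]
    split
    · simpa using Nat.le_succ_of_le ih
    · simp

def pvGroupBy {α : Type} (key : α → Int) : List α → List (List α)
  | [] => []
  | x :: xs =>
    let p := pvSpanKey key (key x) xs
    (x :: p.1) :: pvGroupBy key p.2
termination_by l => l.length
decreasing_by
  exact Nat.lt_succ_of_le (pvSpanKey_snd_length_le _ _ xs)

def coalesce_ranges_py_alt (offset_to_tag : List (Int × String)) : List (Int × Int × (List (Int × String))) :=
  let d := PySem.Dict.ofList offset_to_tag
  let offsets := PySem.List.sorted d.keys (fun x => x) false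
  (pvGroupBy (fun p => p.2 - p.1) (PySem.List.enumerate offsets 0)).map
    (fun grp =>
      let run := grp.map (fun x => x.2)
      (run.headD 0, (run.length : Int), run.map (fun off => (off, d.getD off ""))))

-- ===== PRECONDITION & SPEC =====
def Spec_coalesce_ranges_py (offset_to_tag : List (Int × String)) (out : List (Int × Int × (List (Int × String)))) : Prop := out = coalesce_ranges_py_alt offset_to_tag
instance (offset_to_tag : List (Int × String)) (out : List (Int × Int × (List (Int × String)))) : Decidable (Spec_coalesce_ranges_py offset_to_tag out) := by unfold Spec_coalesce_ranges_py; infer_instance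

-- ===== CLAIM (what is proved, stated in full; the proofs are below) =====
def Claim_equal_coalesce_ranges_py : Prop := ∀ (offset_to_tag : List (Int × String)), Dom_coalesce_ranges_py offset_to_tag → Spec_coalesce_ranges_py offset_to_tag (coalesce_ranges_py offset_to_tag)

-- ===== LEMMAS AND PROOFS =====

-- A's loop body as a recursion producing the rest of the output (proof-only helper)
def pvBuild (d : PySem.Dict Int String) (start prev : Int) (group : List (Int × String)) :
    List Int → List (Int × Int × (List (Int × String)))
  | [] => [(start, (group.length : Int), group)]
  | off :: l =>
    if off = prev + 1 then pvBuild d start off (group ++ [(off, d.getD off "")]) l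
    else (start, (group.length : Int), group) :: pvBuild d off off [(off, d.getD off "")] l

-- split off the consecutive run a+1, a+2, … (proof-only helper)
def pvSpanFrom (a : Int) : List Int → List Int × List Int
  | [] => ([], [])
  | b :: t =>
    if b = a + 1 then
      let p := pvSpanFrom b t
      (b :: p.1, p.2)
    else ([], b :: t)

theorem pvSpanFrom_append (a : Int) (l : List Int) :
    (pvSpanFrom a l).1 ++ (pvSpanFrom a l).2 = l := by
  induction l generalizing a with
  | nil => simp [pvSpanFrom]
  | cons b t ih =>
    simp only [pvSpanFrom]
    split
    · simpa using ih b
    · simp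

theorem pvA_foldl (d : PySem.Dict Int String) (l : List Int) :
    ∀ (acc : List (Int × Int × List (Int × String))) (start prev : Int) (group : List (Int × String)),
    (l.foldl
      (fun (st : List (Int × Int × List (Int × String)) × Int × Int × List (Int × String)) off =>
        if off = st.2.2.1 + 1 then
          (st.1, st.2.1, off, st.2.2.2 ++ [(off, d.getD off "")])
        else
          (st.1 ++ [(st.2.1, (st.2.2.2.length : Int), st.2.2.2)], off, off, [(off, d.getD off "")]))
      (acc, start, prev, group)).1 ++
    [((l.foldl
      (fun (st : List (Int × Int × List (Int × String)) × Int × Int × List (Int × String)) off =>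
        if off = st.2.2.1 + 1 then
          (st.1, st.2.1, off, st.2.2.2 ++ [(off, d.getD off "")])
        else
          (st.1 ++ [(st.2.1, (st.2.2.2.length : Int), st.2.2.2)], off, off, [(off, d.getD off "")]))
      (acc, start, prev, group)).2.1,
      ((l.foldl
      (fun (st : List (Int × Int × List (Int × String)) × Int × Int × List (Int × String)) off =>
        if off = st.2.2.1 + 1 then
          (st.1, st.2.1, off, st.2.2.2 ++ [(off, d.getD off "")])
        else
          (st.1 ++ [(st.2.1, (st.2.2.2.length : Int), st.2.2.2)], off, off, [(off, d.getD off "")]))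
      (acc, start, prev, group)).2.2.2.length : Int),
      (l.foldl
      (fun (st : List (Int × Int × List (Int × String)) × Int × Int × List (Int × String)) off =>
        if off = st.2.2.1 + 1 then
          (st.1, st.2.1, off, st.2.2.2 ++ [(off, d.getD off "")])
        else
          (st.1 ++ [(st.2.1, (st.2.2.2.length : Int), st.2.2.2)], off, off, [(off, d.getD off "")]))
      (acc, start, prev, group)).2.2.2)] = acc ++ pvBuild d start prev group l := by
  induction l with
  | nil => intro acc start prev group; simp [pvBuild]
  | cons off l ih =>
    intro acc start prev group
    by_cases hc : off = prev + 1
    · simp only [List.foldl_cons, if_pos hc]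
      rw [ih]
      conv_rhs => rw [pvBuild]
      rw [if_pos hc]
    · simp only [List.foldl_cons, if_neg hc]
      rw [ih]
      conv_rhs => rw [pvBuild]
      rw [if_neg hc]
      simp

theorem pvSpanKey_enumerate (l : List Int) : ∀ (i a : Int),
    pvSpanKey (fun p => p.2 - p.1) (a - i) (PySem.List.enumerate l (i + 1)) =
      (PySem.List.enumerate (pvSpanFrom a l).1 (i + 1),
       PySem.List.enumerate (pvSpanFrom a l).2 (i + 1 + ((pvSpanFrom a l).1.length : Int))) := by
  induction l with
  | nil => intro i a; simp [pvSpanFrom, PySem.List.enumerate_nil, pvSpanKey]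
  | cons b t ih =>
    intro i a
    rw [PySem.List.enumerate_cons]
    by_cases hb : b = a + 1
    · have hk : b - (i + 1) = a - i := by omega
      conv_lhs => rw [pvSpanKey]
      rw [if_pos (by simpa using hk)]
      rw [← hk, ih (i + 1) b]
      conv_rhs => rw [pvSpanFrom]
      rw [if_pos hb]
      simp only [PySem.List.enumerate_cons, List.length_cons]
      refine congrArg (fun z => ((i + 1, b) :: PySem.List.enumerate (pvSpanFrom b t).1 (i + 1 + 1),
        PySem.List.enumerate (pvSpanFrom b t).2 z)) ?_
      push_cast
      ring
    · have hk : ¬ (b - (i + 1) = a - i) := by omega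
      conv_lhs => rw [pvSpanKey]
      rw [if_neg (by simpa using hk)]
      conv_rhs => rw [pvSpanFrom]
      rw [if_neg hb]
      simp [PySem.List.enumerate_nil, PySem.List.enumerate_cons]

theorem pvBuild_span (d : PySem.Dict Int String) (l : List Int) :
    ∀ (a start : Int) (g : List (Int × String)),
    pvBuild d start a g l =
      (match (pvSpanFrom a l).2 with
       | [] => [(start, ((g ++ (pvSpanFrom a l).1.map (fun off => (off, d.getD off ""))).length : Int),
                 g ++ (pvSpanFrom a l).1.map (fun off => (off, d.getD off "")))]
       | b :: t => (start, ((g ++ (pvSpanFrom a l).1.map (fun off => (off, d.getD off ""))).length : Int),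
                 g ++ (pvSpanFrom a l).1.map (fun off => (off, d.getD off ""))) ::
                 pvBuild d b b [(b, d.getD b "")] t) := by
  induction l with
  | nil => intro a start g; simp [pvBuild, pvSpanFrom]
  | cons b t ih =>
    intro a start g
    by_cases hb : b = a + 1
    · conv_lhs => rw [pvBuild]
      rw [if_pos hb]
      rw [ih b start (g ++ [(b, d.getD b "")])]
      conv_rhs => rw [pvSpanFrom]
      rw [if_pos hb]
      rcases h' : pvSpanFrom b t with ⟨r', rest'⟩
      cases rest' <;> simp
    · conv_lhs => rw [pvBuild]
      rw [if_neg hb]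
      conv_rhs => rw [pvSpanFrom]
      rw [if_neg hb]
      simp

theorem pvMain (d : PySem.Dict Int String) : ∀ (n : Nat) (l : List Int), l.length ≤ n → ∀ (i a : Int),
    (pvGroupBy (fun p => p.2 - p.1) (PySem.List.enumerate (a :: l) i)).map
      (fun grp =>
        (((grp.map (fun x => x.2)).headD 0 : Int), ((grp.map (fun x => x.2)).length : Int),
          (grp.map (fun x => x.2)).map (fun off => (off, d.getD off "")))) =
    pvBuild d a a [(a, d.getD a "")] l := by
  intro n
  induction n with
  | zero =>
    intro l hl i a
    have : l = [] := List.eq_nil_of_length_eq_zero (Nat.le_zero.mp hl)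
    subst this
    rw [PySem.List.enumerate_cons, pvGroupBy]
    simp [pvSpanKey, PySem.List.enumerate_nil, pvGroupBy, pvBuild]
  | succ n ih =>
    intro l hl i a
    rw [PySem.List.enumerate_cons, pvGroupBy]
    rw [show ((i, a).2 - (i, a).1) = a - i from rfl, pvSpanKey_enumerate l i a]
    rw [pvBuild_span]
    rcases hspan : pvSpanFrom a l with ⟨r, rest⟩
    have hlen : r.length + rest.length = l.length := by
      have := pvSpanFrom_append a l
      rw [hspan] at this
      simpa using congrArg List.length this
    cases rest with
    | nil =>
      simp only [PySem.List.enumerate_nil, pvGroupBy, List.map_cons, List.map_nil]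
      simp [PySem.List.map_snd_enumerate]
    | cons b t =>
      simp only [List.map_cons]
      rw [PySem.List.enumerate_cons]
      rw [show PySem.List.enumerate t (i + 1 + (r.length : Int) + 1) =
            PySem.List.enumerate t ((i + 1 + (r.length : Int)) + 1) from rfl]
      rw [show ((i + 1 + (r.length : Int), b) :: PySem.List.enumerate t (i + 1 + (r.length : Int) + 1)) =
            PySem.List.enumerate (b :: t) (i + 1 + (r.length : Int)) from
        (PySem.List.enumerate_cons _ _ _).symm]
      simp only [List.length_cons] at hlen
      have ht : t.length ≤ n := by omega
      rw [ih t ht (i + 1 + (r.length : Int)) b]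
      simp [PySem.List.map_snd_enumerate]

-- ===== VERDICT (by name: the statement is the Claim_ definition above) =====
theorem coalesce_ranges_py_spec : Claim_equal_coalesce_ranges_py := by
  intro xs _
  unfold Spec_coalesce_ranges_py
  simp only [coalesce_ranges_py, coalesce_ranges_py_alt]
  cases h : PySem.List.sorted (PySem.Dict.ofList xs).keys (fun x => x) false with
  | nil =>
    dsimp only
    simp [PySem.List.enumerate_nil, pvGroupBy]
  | cons start rest =>
    dsimp only
    rw [pvA_foldl (PySem.Dict.ofList xs) rest [] start start [(start, (PySem.Dict.ofList xs).getD start "")]]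
    rw [← pvMain (PySem.Dict.ofList xs) rest.length rest le_rfl 0 start]
    simp
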